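-- pv_equiv track=rewrite | github.com/ikrambel22/Sentiment_analysis_Project | main.py | calcul_average
-- ===== SOURCE A (Python) =====
-- def calcul_average(l):
--         i=0
--         j=0
--         k=0
--         for x in l:
--             if x=='negative':
--                 i=i+1
--             elif x=='positive':
--                 j=j+1
--             else:
--                 k=k+1
--         return i,j,k
-- ===== SOURCE B (Python) =====
-- def calcul_average(l):
--     i = l.count('negative')
--     j = l.count('positive')
--     return i, j, len(l) - i - j
-- ===== Notes on version B (the rewrite author's own statement) =====
-- stated objective: simpler
-- what changed: Replaces the single three-way-branch accumulator loop with two direct l.count scans; the 'other' count is derived arithmetically as len(l) - i - j instead of being counted by a branch.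
import Mathlib
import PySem

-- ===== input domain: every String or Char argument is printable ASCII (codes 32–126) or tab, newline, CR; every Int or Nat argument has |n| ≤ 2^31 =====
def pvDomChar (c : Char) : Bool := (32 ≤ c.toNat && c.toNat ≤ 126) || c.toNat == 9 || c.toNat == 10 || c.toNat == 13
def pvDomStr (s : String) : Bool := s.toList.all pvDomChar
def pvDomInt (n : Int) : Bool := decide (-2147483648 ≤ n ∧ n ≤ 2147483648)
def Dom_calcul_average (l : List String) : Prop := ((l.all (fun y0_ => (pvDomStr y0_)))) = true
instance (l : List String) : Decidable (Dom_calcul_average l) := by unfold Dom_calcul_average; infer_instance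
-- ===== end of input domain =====

-- ===== PORT A =====
-- B replaces the three-way-branch loop with two direct counts and derives 'other' by subtraction (simpler decomposition).
def calcul_average (l : List String) : Int × Int × Int :=
  (l.foldl (fun (s : Int × Int × Int) x =>
      if x == "negative" then (s.1 + 1, s.2.1, s.2.2)
      else if x == "positive" then (s.1, s.2.1 + 1, s.2.2)
      else (s.1, s.2.1, s.2.2 + 1)) (0, 0, 0))

-- ===== PORT B =====
def calcul_average_alt (l : List String) : Int × Int × Int :=
  let i : Int := PySem.List.count l "negative"
  let j : Int := PySem.List.count l "positive"
  (i, j, (l.length : Int) - i - j)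

-- ===== PRECONDITION & SPEC =====
def Spec_calcul_average (l : List String) (out : Int × Int × Int) : Prop := out = calcul_average_alt l
instance (l : List String) (out : Int × Int × Int) : Decidable (Spec_calcul_average l out) := by unfold Spec_calcul_average; infer_instance

-- ===== CLAIM (what is proved, stated in full; the proofs are below) =====
def Claim_equal_calcul_average : Prop := ∀ (l : List String), Dom_calcul_average l → Spec_calcul_average l (calcul_average l)

-- ===== LEMMAS AND PROOFS =====

-- ===== VERDICT (by name: the statement is the Claim_ definition above) =====
lemma calcul_average_loop (l : List String) (i j k : Int) :
    l.foldl (fun (s : Int × Int × Int) x =>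
      if x == "negative" then (s.1 + 1, s.2.1, s.2.2)
      else if x == "positive" then (s.1, s.2.1 + 1, s.2.2)
      else (s.1, s.2.1, s.2.2 + 1)) (i, j, k)
    = (i + (l.count "negative" : Int), j + (l.count "positive" : Int),
       k + (l.length : Int) - (l.count "negative" : Int) - (l.count "positive" : Int)) := by
  induction l generalizing i j k with
  | nil => simp
  | cons a t ih =>
    by_cases h1 : a == "negative"
    · simp only [List.foldl_cons, if_pos h1, ih]
      have : a = "negative" := by simpa using h1
      subst this
      simp
      omega
    · by_cases h2 : a == "positive"
      · simp only [List.foldl_cons, if_neg h1, if_pos h2, ih]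
        have : a = "positive" := by simpa using h2
        subst this
        simp
        omega
      · simp only [List.foldl_cons, if_neg h1, if_neg h2, ih]
        have hn : a ≠ "negative" := by simpa using h1
        have hp : a ≠ "positive" := by simpa using h2
        rw [List.count_cons_of_ne hn, List.count_cons_of_ne hp]
        simp
        omega

-- ===== VERDICT =====
theorem calcul_average_spec : Claim_equal_calcul_average := by
  intro l _
  unfold Spec_calcul_average calcul_average calcul_average_alt
  rw [calcul_average_loop]
  simp [PySem.List.count]
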